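-- pv_equiv track=rewrite | github.com/402rayan/mousseBot | fonctions_statistiques.py | getMoyennes
-- ===== SOURCE A (Python) =====
-- def getMoyennes(all_characters):
--     #Retourne un dictionnaire avec les stats moyennes des personnages par rang
--     moyennes = {}
--     nombres_persos = {}
--     for character in all_characters:
--         rang = character[2]
--         if rang not in moyennes:
--             moyennes[rang] = [0,0,0]
--             nombres_persos[rang] = 0
--         moyennes[rang][0] += character[4]
--         moyennes[rang][1] += character[5]
--         moyennes[rang][2] += character[6]
--         nombres_persos[rang] += 1
--     for rang in moyennes:
--         moyennes[rang][0] //= nombres_persos[rang]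
--         moyennes[rang][1] //= nombres_persos[rang]
--         moyennes[rang][2] //= nombres_persos[rang]
--     return moyennes
-- ===== SOURCE B (Python) =====
-- def getMoyennes(all_characters):
--     # Two-pass group-by: distinct ranks in first-seen order, then average each rank's group.
--     moyennes = {}
--     for rang in dict.fromkeys(c[2] for c in all_characters):
--         grp = [c for c in all_characters if c[2] == rang]
--         n = len(grp)
--         moyennes[rang] = [sum(c[4] for c in grp) // n,
--                           sum(c[5] for c in grp) // n,
--                           sum(c[6] for c in grp) // n]
--     return moyennes
-- ===== Notes on version B (the rewrite author's own statement) =====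
-- stated objective: alternative
-- what changed: Replaces A's single pass of incremental per-rank running sums and counts held in two parallel dicts (followed by an in-place dividing loop) with a two-pass group-by: the distinct ranks are computed once in first-seen order, then each rank's group is filtered out of the input and averaged directly.
import Mathlib
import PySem

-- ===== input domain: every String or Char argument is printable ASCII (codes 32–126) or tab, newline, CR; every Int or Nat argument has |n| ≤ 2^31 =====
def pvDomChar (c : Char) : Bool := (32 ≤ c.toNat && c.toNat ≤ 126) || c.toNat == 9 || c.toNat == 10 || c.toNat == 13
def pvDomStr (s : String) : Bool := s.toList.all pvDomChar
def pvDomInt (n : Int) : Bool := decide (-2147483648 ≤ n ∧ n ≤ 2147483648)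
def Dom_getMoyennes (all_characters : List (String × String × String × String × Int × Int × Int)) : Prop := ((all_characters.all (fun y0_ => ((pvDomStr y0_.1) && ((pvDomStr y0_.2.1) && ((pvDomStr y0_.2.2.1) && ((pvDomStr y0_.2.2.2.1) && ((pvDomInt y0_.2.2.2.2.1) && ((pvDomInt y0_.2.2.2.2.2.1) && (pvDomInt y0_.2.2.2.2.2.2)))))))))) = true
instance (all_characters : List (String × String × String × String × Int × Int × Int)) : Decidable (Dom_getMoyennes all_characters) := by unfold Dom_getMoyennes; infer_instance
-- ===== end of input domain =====

-- B replaces A's incremental running-sums/counts pass (two parallel dicts, then an in-place dividing loop) by a two-pass group-by: distinct ranks first-seen, then filter-and-average each rank's group; alternative decomposition, same results.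


abbrev pvCh : Type := String × String × String × String × Int × Int × Int

-- ===== PORT A =====
-- one iteration of A's first loop: ensure the rank is present, then add the three stats ('moyennes[rang][i] += character[4+i]') and bump the count
def stepA (st : PySem.Dict String (List Int) × PySem.Dict String Int)
    (c : pvCh) :
    PySem.Dict String (List Int) × PySem.Dict String Int :=
  let rang := c.2.2.1
  let m := st.1
  let nb := st.2
  let m' := if m.contains rang then m else m.insert rang [0, 0, 0]
  let nb' := if m.contains rang then nb else nb.insert rang 0
  let v := m'.getD rang [0, 0, 0]
  let v := PySem.List.pySetD v 0 (PySem.List.pyGetD v 0 0 + c.2.2.2.2.1)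
  let v := PySem.List.pySetD v 1 (PySem.List.pyGetD v 1 0 + c.2.2.2.2.2.1)
  let v := PySem.List.pySetD v 2 (PySem.List.pyGetD v 2 0 + c.2.2.2.2.2.2)
  (m'.insert rang v, nb'.insert rang (nb'.getD rang 0 + 1))

-- one iteration of A's second loop: divide the three running sums in place by the count ('moyennes[rang][i] //= nombres_persos[rang]')
def divStep (nb : PySem.Dict String Int) (m : PySem.Dict String (List Int)) (rang : String) :
    PySem.Dict String (List Int) :=
  m.insert rang
    (let v := m.getD rang [0, 0, 0]
     let cnt := nb.getD rang 0
     let v := PySem.List.pySetD v 0 (PySem.Int.floordiv (PySem.List.pyGetD v 0 0) cnt)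
     let v := PySem.List.pySetD v 1 (PySem.Int.floordiv (PySem.List.pyGetD v 1 0) cnt)
     PySem.List.pySetD v 2 (PySem.Int.floordiv (PySem.List.pyGetD v 2 0) cnt))

def getMoyennes (all_characters : List (String × String × String × String × Int × Int × Int)) : List (String × List Int) :=
  let p := all_characters.foldl stepA (PySem.Dict.empty, PySem.Dict.empty)
  ((p.1.keys).foldl (divStep p.2) p.1).items


-- ===== PORT B =====
def getMoyennes_alt (all_characters : List (String × String × String × String × Int × Int × Int)) : List (String × List Int) :=
  let ranks := PySem.List.dedup (all_characters.map (fun c => c.2.2.1))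
  (ranks.foldl (fun d rang =>
      let grp := all_characters.filter (fun c => c.2.2.1 == rang)
      let n : Int := grp.length
      d.insert rang [PySem.Int.floordiv ((grp.map (fun c => c.2.2.2.2.1)).sum) n,
                     PySem.Int.floordiv ((grp.map (fun c => c.2.2.2.2.2.1)).sum) n,
                     PySem.Int.floordiv ((grp.map (fun c => c.2.2.2.2.2.2)).sum) n])
    PySem.Dict.empty).items

-- ===== PRECONDITION & SPEC =====
def Spec_getMoyennes (all_characters : List (String × String × String × String × Int × Int × Int)) (out : List (String × List Int)) : Prop := out = getMoyennes_alt all_characters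
instance (all_characters : List (String × String × String × String × Int × Int × Int)) (out : List (String × List Int)) : Decidable (Spec_getMoyennes all_characters out) := by unfold Spec_getMoyennes; infer_instance

-- ===== CLAIM (what is proved, stated in full; the proofs are below) =====
def Claim_equal_getMoyennes : Prop := ∀ (all_characters : List (String × String × String × String × Int × Int × Int)), Dom_getMoyennes all_characters → Spec_getMoyennes all_characters (getMoyennes all_characters)

-- ===== LEMMAS AND PROOFS =====
def pvGrp (xs : List pvCh) (r : String) : List pvCh := xs.filter (fun c => c.2.2.1 == r)

lemma pvChain_eval (a b cc x y z : Int) :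
    (PySem.List.pySetD
      (PySem.List.pySetD
        (PySem.List.pySetD [a, b, cc] 0 (PySem.List.pyGetD [a, b, cc] 0 0 + x))
        1 (PySem.List.pyGetD (PySem.List.pySetD [a, b, cc] 0 (PySem.List.pyGetD [a, b, cc] 0 0 + x)) 1 0 + y))
      2 (PySem.List.pyGetD (PySem.List.pySetD
        (PySem.List.pySetD [a, b, cc] 0 (PySem.List.pyGetD [a, b, cc] 0 0 + x))
        1 (PySem.List.pyGetD (PySem.List.pySetD [a, b, cc] 0 (PySem.List.pyGetD [a, b, cc] 0 0 + x)) 1 0 + y)) 2 0 + z))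
    = [a + x, b + y, cc + z] := by
  simp [PySem.List.pySetD, PySem.List.pySet?, PySem.List.pyGetD, PySem.List.pyGet?, PySem.List.pyIdx?]

lemma stepA_of_contains (st : PySem.Dict String (List Int) × PySem.Dict String Int) (c : pvCh)
    (hc : st.1.contains c.2.2.1 = true)
    (a b cc : Int) (hv : st.1.getD c.2.2.1 [0, 0, 0] = [a, b, cc]) :
    stepA st c = (st.1.insert c.2.2.1 [a + c.2.2.2.2.1, b + c.2.2.2.2.2.1, cc + c.2.2.2.2.2.2],
                  st.2.insert c.2.2.1 (st.2.getD c.2.2.1 0 + 1)) := by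
  rw [stepA]
  simp only [hc, if_true, hv, pvChain_eval]

lemma stepA_of_not_contains (st : PySem.Dict String (List Int) × PySem.Dict String Int) (c : pvCh)
    (hc : st.1.contains c.2.2.1 = false) :
    stepA st c = (st.1.insert c.2.2.1 [c.2.2.2.2.1, c.2.2.2.2.2.1, c.2.2.2.2.2.2],
                  st.2.insert c.2.2.1 1) := by
  rw [stepA]
  simp only [hc, Bool.false_eq_true, if_false, PySem.Dict.getD_insert_self, pvChain_eval,
    PySem.Dict.insert_insert_self, zero_add, PySem.Dict.getD_insert_self]

lemma pvDedup_append_singleton (l : List String) (x : String) :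
    PySem.List.dedup (l ++ [x]) = PySem.Set.add (PySem.List.dedup l) x := by
  simp [PySem.List.dedup_eq_ofList, PySem.Set.ofList_eq_foldl, List.foldl_append]

lemma pvGrp_append_singleton (xs : List pvCh) (c : pvCh) (r : String) :
    pvGrp (xs ++ [c]) r = pvGrp xs r ++ (if c.2.2.1 = r then [c] else []) := by
  simp only [pvGrp, List.filter_append]
  split_ifs with h <;> simp [h]

lemma pvGrp_nil_of_not_mem (xs : List pvCh) (r : String)
    (h : r ∉ xs.map (fun c => c.2.2.1)) : pvGrp xs r = [] := by
  rw [pvGrp, List.filter_eq_nil_iff]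
  intro a ha hb
  exact h (List.mem_map.mpr ⟨a, ha, by simpa using hb⟩)

lemma foldA_inv (xs : List pvCh) :
    ((xs.foldl stepA (PySem.Dict.empty, PySem.Dict.empty)).1.keys
        = PySem.List.dedup (xs.map (fun c => c.2.2.1)))
  ∧ (∀ r, (xs.foldl stepA (PySem.Dict.empty, PySem.Dict.empty)).1.getD r [0,0,0]
        = [((pvGrp xs r).map (fun c => c.2.2.2.2.1)).sum,
           ((pvGrp xs r).map (fun c => c.2.2.2.2.2.1)).sum,
           ((pvGrp xs r).map (fun c => c.2.2.2.2.2.2)).sum])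
  ∧ (∀ r, (xs.foldl stepA (PySem.Dict.empty, PySem.Dict.empty)).2.getD r 0
        = ((pvGrp xs r).length : Int)) := by
  induction xs using List.reverseRecOn with
  | nil =>
      refine ⟨by simp [PySem.List.dedup], ?_, ?_⟩ <;> intro r <;> simp [pvGrp]
  | append_singleton ys c ih =>
      obtain ⟨hk, hm, hn⟩ := ih
      rw [List.foldl_append] at *
      set p := ys.foldl stepA (PySem.Dict.empty, PySem.Dict.empty) with hp
      simp only [List.foldl_cons, List.foldl_nil]
      have hmapapp : (ys ++ [c]).map (fun c => c.2.2.1) = ys.map (fun c => c.2.2.1) ++ [c.2.2.1] := by simp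
      have hcont : p.1.contains c.2.2.1 = decide (c.2.2.1 ∈ ys.map (fun c => c.2.2.1)) := by
        rw [PySem.Dict.contains_eq_decide_mem_keys, hk]
        simp
      by_cases hmem : c.2.2.1 ∈ ys.map (fun c => c.2.2.1)
      · have hc : p.1.contains c.2.2.1 = true := by rw [hcont]; exact decide_eq_true hmem
        rw [stepA_of_contains p c hc _ _ _ (hm c.2.2.1)]
        refine ⟨?_, ?_, ?_⟩
        · rw [PySem.Dict.keys_insert_of_contains _ _ hc, hk, hmapapp, pvDedup_append_singleton]
          simp [PySem.Set.add, PySem.Set.contains, hmem]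
        · intro r
          rw [PySem.Dict.getD_insert, pvGrp_append_singleton, hm r]
          by_cases hr : r = c.2.2.1
          · subst hr; simp
          · simp [hr, Ne.symm hr]
        · intro r
          rw [PySem.Dict.getD_insert, pvGrp_append_singleton, hn r]
          by_cases hr : r = c.2.2.1
          · subst hr; simp [hn c.2.2.1]
          · simp [hr, Ne.symm hr]
      · have hc : p.1.contains c.2.2.1 = false := by rw [hcont]; exact decide_eq_false hmem
        rw [stepA_of_not_contains p c hc]
        refine ⟨?_, ?_, ?_⟩
        · rw [PySem.Dict.keys_insert_of_not_contains _ _ hc, hk, hmapapp, pvDedup_append_singleton]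
          simp [PySem.Set.add, PySem.Set.contains, hmem]
        · intro r
          rw [PySem.Dict.getD_insert, pvGrp_append_singleton, hm r]
          by_cases hr : r = c.2.2.1
          · subst hr
            rw [pvGrp_nil_of_not_mem ys _ hmem]
            simp
          · simp [hr, Ne.symm hr]
        · intro r
          rw [PySem.Dict.getD_insert, pvGrp_append_singleton, hn r]
          by_cases hr : r = c.2.2.1
          · subst hr
            rw [pvGrp_nil_of_not_mem ys _ hmem]
            simp
          · simp [hr, Ne.symm hr]

-- a fold that rewrites each key of K once (K nodup) via a function of that key's current value
lemma pvFoldRewrite_getD (g : String → List Int → List Int) :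
    ∀ (K : List String) (m : PySem.Dict String (List Int)), K.Nodup → ∀ (r : String),
    ((K.foldl (fun d rang => d.insert rang (g rang (d.getD rang [0, 0, 0]))) m).getD r [0, 0, 0])
      = if r ∈ K then g r (m.getD r [0, 0, 0]) else m.getD r [0, 0, 0] := by
  intro K
  induction K with
  | nil => intro m _ r; simp
  | cons a K ihK =>
      intro m hnd r
      obtain ⟨ha, hnd2⟩ := List.nodup_cons.mp hnd
      rw [List.foldl_cons, ihK _ hnd2 r]
      by_cases hr : r ∈ K
      · have hra : r ≠ a := by rintro rfl; exact ha hr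
        simp [hr, hra, PySem.Dict.getD_insert]
      · by_cases hra : r = a
        · subst hra; simp [hr]
        · simp [hr, hra, PySem.Dict.getD_insert]

lemma pvSetUpdate_self (K : List String) :
    ∀ (s : List String), (∀ x ∈ K, x ∈ s) → PySem.Set.update s K = s := by
  induction K with
  | nil => intro s _; rfl
  | cons a K ihK =>
      intro s h
      rw [PySem.Set.update, List.foldl_cons]
      have : PySem.Set.add s a = s := by simp [PySem.Set.add, PySem.Set.contains, h a (by simp)]
      rw [this]
      exact ihK s (fun x hx => h x (by simp [hx]))

lemma pvFoldFresh_items (v : String → List Int) :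
    ∀ (K : List String) (d : PySem.Dict String (List Int)),
    (∀ r ∈ K, d.contains r = false) → K.Nodup →
    (K.foldl (fun d r => d.insert r (v r)) d).items = d.items ++ K.map (fun r => (r, v r)) := by
  intro K
  induction K with
  | nil => intro d _ _; simp
  | cons a K ihK =>
      intro d hf hnd
      obtain ⟨ha, hnd2⟩ := List.nodup_cons.mp hnd
      rw [List.foldl_cons, ihK _ ?_ hnd2,
        PySem.Dict.items_insert_of_not_contains _ _ (hf a (by simp))]
      · simp
      · intro r hr
        rw [PySem.Dict.contains_insert]
        have hra : r ≠ a := by rintro rfl; exact ha hr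
        simp [hra, hf r (by simp [hr])]

def pvG (nb : PySem.Dict String Int) (rang : String) (v0 : List Int) : List Int :=
  let cnt := nb.getD rang 0
  let v := PySem.List.pySetD v0 0 (PySem.Int.floordiv (PySem.List.pyGetD v0 0 0) cnt)
  let v := PySem.List.pySetD v 1 (PySem.Int.floordiv (PySem.List.pyGetD v 1 0) cnt)
  PySem.List.pySetD v 2 (PySem.Int.floordiv (PySem.List.pyGetD v 2 0) cnt)

lemma pvG_eval (nb : PySem.Dict String Int) (rang : String) (a b cc : Int) :
    pvG nb rang [a, b, cc] = [PySem.Int.floordiv a (nb.getD rang 0),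
      PySem.Int.floordiv b (nb.getD rang 0), PySem.Int.floordiv cc (nb.getD rang 0)] := by
  simp [pvG, PySem.List.pySetD, PySem.List.pySet?, PySem.List.pyGetD, PySem.List.pyGet?, PySem.List.pyIdx?]

def pvVal (xs : List pvCh) (rang : String) : List Int :=
  let grp := xs.filter (fun c => c.2.2.1 == rang)
  let n : Int := grp.length
  [PySem.Int.floordiv ((grp.map (fun c => c.2.2.2.2.1)).sum) n,
   PySem.Int.floordiv ((grp.map (fun c => c.2.2.2.2.2.1)).sum) n,
   PySem.Int.floordiv ((grp.map (fun c => c.2.2.2.2.2.2)).sum) n]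

theorem pvMain (xs : List pvCh) : getMoyennes xs = getMoyennes_alt xs := by
  obtain ⟨hk, hm, hn⟩ := foldA_inv xs
  have hB : getMoyennes_alt xs
      = (PySem.List.dedup (xs.map (fun c => c.2.2.1))).map (fun r => (r, pvVal xs r)) := by
    show ((PySem.List.dedup (xs.map (fun c => c.2.2.1))).foldl
        (fun d r => d.insert r (pvVal xs r)) PySem.Dict.empty).items = _
    rw [pvFoldFresh_items _ _ _ (fun r _ => PySem.Dict.contains_empty r)
      (PySem.List.nodup_dedup _)]
    simp [PySem.Dict.empty]
  have hA : getMoyennes xs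
      = (((xs.foldl stepA (PySem.Dict.empty, PySem.Dict.empty)).1.keys).foldl
          (fun d rang => d.insert rang
            (pvG (xs.foldl stepA (PySem.Dict.empty, PySem.Dict.empty)).2 rang (d.getD rang [0, 0, 0])))
          (xs.foldl stepA (PySem.Dict.empty, PySem.Dict.empty)).1).items := rfl
  set p := xs.foldl stepA (PySem.Dict.empty, PySem.Dict.empty) with hp
  set F := (p.1.keys).foldl
      (fun d rang => d.insert rang (pvG p.2 rang (d.getD rang [0, 0, 0]))) p.1 with hF
  have hnodK : p.1.keys.Nodup := by rw [hk]; exact PySem.List.nodup_dedup _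
  have hFkeys : F.keys = p.1.keys := by
    rw [hF, PySem.Dict.keys_foldl_insert _ (fun d x => pvG p.2 x (d.getD x [0, 0, 0]))]
    exact pvSetUpdate_self _ _ (fun x hx => hx)
  have hFitems : F.items = F.keys.map (fun k => (k, F.getD k [0, 0, 0])) :=
    PySem.Dict.items_eq_map_keys F (hFkeys ▸ hnodK) [0, 0, 0]
  rw [hA, hFitems, hFkeys, hk, hB]
  apply List.map_congr_left
  intro r hr
  have hrK : r ∈ p.1.keys := by rw [hk]; exact hr
  have hFgetD : F.getD r [0, 0, 0] = pvG p.2 r (p.1.getD r [0, 0, 0]) := by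
    rw [hF, pvFoldRewrite_getD _ _ _ hnodK r, if_pos hrK]
  rw [hFgetD, hm r, pvG_eval, hn r]
  rfl

-- ===== VERDICT (by name: the statement is the Claim_ definition above) =====
theorem getMoyennes_spec : Claim_equal_getMoyennes := by
  intro xs _
  unfold Spec_getMoyennes
  exact pvMain xs
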